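-- pv_equiv track=rewrite | github.com/yuio0801/SICP | Mine/hw03-Code/hw03.py | missing_digits
-- ===== SOURCE A (Python) =====
-- def missing_digits(n):
--     """Given a number a that is in sorted, increasing order,
--     return the number of missing digits in n. A missing digit is
--     a number between the first and last digit of a that is not in n.
--     >>> missing_digits(1248) # 3, 5, 6, 7
--     4
--     >>> missing_digits(1122) # No missing numbers
--     0
--     >>> missing_digits(123456) # No missing numbers
--     0
--     >>> missing_digits(3558) # 4, 6, 7
--     3
--     >>> missing_digits(4) # No missing numbers between 4 and 4
--     0
--     >>> from construct_check import check
--     >>> # ban while or for loops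
--     >>> check(HW_SOURCE_FILE, 'missing_digits', ['While', 'For'])
--     True
--     """
--     if(n < 10) :
--         return 0
--     else:
--         nxt = n // 10
--         nxt = nxt % 10
--         now = n % 10
--         if(now == nxt):
--             return missing_digits(n // 10)
--         else:
--             return missing_digits(n // 10) + now - nxt - 1
-- ===== SOURCE B (Python) =====
-- def missing_digits(n):
--     if n < 10:
--         return 0
--     s = str(n)
--     runs = 1 + sum(a != b for a, b in zip(s, s[1:]))
--     return ord(s[-1]) - ord(s[0]) - runs + 1
-- ===== Notes on version B (the rewrite author's own statement) =====
-- stated objective: alternative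
-- what changed: Replaces the digit-by-digit recursion accumulating per-pair gaps with a closed form on the decimal string: last digit minus first digit minus (number of runs of equal adjacent digits - 1).
import Mathlib
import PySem

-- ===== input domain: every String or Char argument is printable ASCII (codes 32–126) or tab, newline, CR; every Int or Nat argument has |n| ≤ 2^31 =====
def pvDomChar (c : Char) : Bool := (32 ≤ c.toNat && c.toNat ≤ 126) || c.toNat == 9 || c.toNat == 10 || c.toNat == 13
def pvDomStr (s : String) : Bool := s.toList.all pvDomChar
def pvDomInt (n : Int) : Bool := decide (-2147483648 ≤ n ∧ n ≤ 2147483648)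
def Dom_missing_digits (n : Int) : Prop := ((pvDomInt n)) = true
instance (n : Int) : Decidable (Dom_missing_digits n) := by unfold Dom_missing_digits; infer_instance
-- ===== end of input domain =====

-- B replaces A's digit recursion summing per-pair gaps with the closed form
-- last digit - first digit - (runs of equal adjacent digits - 1) on str(n); alternative decomposition, same cost.


-- ===== PORT A =====
def missing_digits (n : Int) : Int :=
  if n < 10 then 0
  else
    let nxt := PySem.Int.mod (PySem.Int.floordiv n 10) 10
    let now := PySem.Int.mod n 10
    if now = nxt then missing_digits (PySem.Int.floordiv n 10)
    else missing_digits (PySem.Int.floordiv n 10) + now - nxt - 1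
termination_by n.toNat
decreasing_by
  all_goals
    rw [PySem.Int.floordiv_eq_ediv_of_pos (by omega : (0:Int) < 10)]
    omega

-- ===== PORT B =====
-- sum(a != b for a, b in zip(s, s[1:])): booleans count as 1/0; s[1:] on a list is .tail (exact: start index 1 ≥ 0)
def mdRunBreaks (cs : List Char) : Int :=
  ((cs.zip cs.tail).map (fun p => if p.1 ≠ p.2 then (1:Int) else 0)).sum

-- ord(c) is (c.toNat : Int); s[-1]/s[0] via pyGetD (s is nonempty: n ≥ 10)
def missing_digits_alt (n : Int) : Int :=
  if n < 10 then 0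
  else
    let s := PySem.Int.toChars n
    let runs : Int := 1 + mdRunBreaks s
    ((PySem.List.pyGetD s (-1) '0').toNat : Int) - ((PySem.List.pyGetD s 0 '0').toNat : Int) - runs + 1

-- ===== PRECONDITION & SPEC =====
def Spec_missing_digits (n : Int) (out : Int) : Prop := out = missing_digits_alt n
instance (n : Int) (out : Int) : Decidable (Spec_missing_digits n out) := by unfold Spec_missing_digits; infer_instance

-- ===== CLAIM (what is proved, stated in full; the proofs are below) =====
def Claim_equal_missing_digits : Prop := ∀ (n : Int), Dom_missing_digits n → Spec_missing_digits n (missing_digits n)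

-- ===== LEMMAS AND PROOFS =====

-- the closed form both sides are reduced to, on the digit-character list
def mdG (cs : List Char) : Int :=
  ((cs.getLastD '0').toNat : Int) - ((cs.headD '0').toNat : Int) - (1 + mdRunBreaks cs) + 1

lemma ord_digitChar (d : Nat) (h : d < 10) : ((Nat.digitChar d).toNat : Int) = 48 + d := by
  interval_cases d <;> decide

lemma mdRunBreaks_cons₂ (a b : Char) (t : List Char) :
    mdRunBreaks (a :: b :: t) = (if a = b then 0 else 1) + mdRunBreaks (b :: t) := by
  by_cases hab : a = b <;> simp [mdRunBreaks, hab]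

lemma mdRunBreaks_append (cs : List Char) (h : cs ≠ []) (c : Char) :
    mdRunBreaks (cs ++ [c]) = mdRunBreaks cs + (if cs.getLastD '0' = c then 0 else 1) := by
  induction cs with
  | nil => exact absurd rfl h
  | cons a t ih =>
    cases t with
    | nil => by_cases hac : a = c <;> simp [mdRunBreaks, hac]
    | cons b u =>
      have : (a :: b :: u) ++ [c] = a :: (b :: u ++ [c]) := by simp
      rw [this]
      have hbu : (b :: u ++ [c]) = b :: (u ++ [c]) := by simp
      rw [hbu, mdRunBreaks_cons₂, ← hbu, ih (by simp), mdRunBreaks_cons₂]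
      simp only [List.getLastD_cons]
      ring

lemma toDigits_ne_nil (m : Nat) : Nat.toDigits 10 m ≠ [] := by
  intro h
  have := @Nat.length_toDigits_pos 10 m
  simp [h] at this

lemma toDigits_getLastD (m : Nat) : (Nat.toDigits 10 m).getLastD '0' = Nat.digitChar (m % 10) := by
  by_cases h : m < 10
  · rw [Nat.toDigits_of_lt_base h, Nat.mod_eq_of_lt h]; rfl
  · rw [Nat.toDigits_of_base_le (by norm_num) (by omega)]; simp

lemma A_eq_G (m : Nat) : missing_digits (m : Int) = mdG (Nat.toDigits 10 m) := by
  induction m using Nat.strong_induction_on with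
  | _ m ih =>
    by_cases h : m < 10
    · rw [missing_digits, if_pos (by exact_mod_cast h), Nat.toDigits_of_lt_base h]
      simp [mdG, mdRunBreaks]
    · push Not at h
      have hten : ¬ ((m : Int) < 10) := by exact_mod_cast not_lt.mpr h
      have hf : PySem.Int.floordiv (m : Int) 10 = ((m / 10 : Nat) : Int) := by
        exact_mod_cast PySem.Int.floordiv_natCast m 10
      have hm1 : PySem.Int.mod (m : Int) 10 = ((m % 10 : Nat) : Int) := by
        exact_mod_cast PySem.Int.mod_natCast m 10
      have hm2 : PySem.Int.mod ((m / 10 : Nat) : Int) 10 = ((m / 10 % 10 : Nat) : Int) := by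
        exact_mod_cast PySem.Int.mod_natCast (m / 10) 10
      have hrec := ih (m / 10) (Nat.div_lt_self (by omega) (by omega))
      have hD := toDigits_ne_nil (m / 10)
      have hd1 : m % 10 < 10 := Nat.mod_lt _ (by omega)
      have hd2 : m / 10 % 10 < 10 := Nat.mod_lt _ (by omega)
      rw [missing_digits, if_neg hten]
      simp only [hf, hm1, hm2]
      rw [Nat.toDigits_of_base_le (by norm_num) h]
      have hhead : ((Nat.toDigits 10 (m / 10) ++ [Nat.digitChar (m % 10)]).headD '0')
          = (Nat.toDigits 10 (m / 10)).headD '0' := by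
        cases hcs : Nat.toDigits 10 (m / 10) with
        | nil => exact absurd hcs hD
        | cons a t => simp
      unfold mdG
      rw [mdRunBreaks_append _ hD, toDigits_getLastD, hhead]
      simp only [List.getLastD_eq_getLast?, List.getLast?_append, List.getLast?_singleton, Option.some_or, Option.getD_some]
      by_cases hd : m % 10 = m / 10 % 10
      · have hchar : Nat.digitChar (m / 10 % 10) = Nat.digitChar (m % 10) := by rw [hd]
        rw [if_pos (by exact_mod_cast hd), hrec, if_pos hchar]
        unfold mdG
        rw [toDigits_getLastD, ord_digitChar _ hd1, ord_digitChar _ hd2]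
        push_cast [hd]
        ring
      · have hchar : ¬ (Nat.digitChar (m / 10 % 10) = Nat.digitChar (m % 10)) := by
          intro hc
          apply hd
          have h2 : (((m / 10 % 10).digitChar.toNat : Nat) : Int) = (((m % 10).digitChar.toNat : Nat) : Int) := by
            rw [hc]
          rw [ord_digitChar _ hd2, ord_digitChar _ hd1] at h2
          omega
        rw [if_neg (by exact_mod_cast fun hc => hd (by exact_mod_cast hc)), hrec, if_neg hchar]
        unfold mdG
        rw [toDigits_getLastD, ord_digitChar _ hd1, ord_digitChar _ hd2]
        push_cast
        ring

lemma alt_eq_G (n : Int) (h : ¬ n < 10) : missing_digits_alt n = mdG (Nat.toDigits 10 n.toNat) := by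
  rw [missing_digits_alt, if_neg h]
  have hs : PySem.Int.toChars n = Nat.toDigits 10 n.toNat := by
    simp [PySem.Int.toChars, show ¬ n < 0 by omega]
  simp only [hs]
  have hD := toDigits_ne_nil n.toNat
  have hgl : (Nat.toDigits 10 n.toNat).getLast hD = (Nat.toDigits 10 n.toNat).getLastD '0' := by
    rw [List.getLastD_eq_getLast?, List.getLast?_eq_some_getLast hD]; rfl
  have hgd : (Nat.toDigits 10 n.toNat).getD 0 '0' = (Nat.toDigits 10 n.toNat).headD '0' := by
    cases hcs : Nat.toDigits 10 n.toNat with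
    | nil => exact absurd hcs hD
    | cons a t => simp
  rw [PySem.List.pyGetD_neg_one _ _ hD, PySem.List.pyGetD_zero, hgl, hgd]
  unfold mdG
  ring

-- ===== VERDICT (by name: the statement is the Claim_ definition above) =====
theorem missing_digits_spec : Claim_equal_missing_digits := by
  intro n _
  unfold Spec_missing_digits
  by_cases h : n < 10
  · rw [missing_digits, missing_digits_alt, if_pos h, if_pos h]
  · have hn : ((n.toNat : Nat) : Int) = n := Int.toNat_of_nonneg (by omega)
    rw [alt_eq_G n h, ← hn, A_eq_G, Int.toNat_natCast]
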